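-- pv_equiv track=rewrite | github.com/daredem0/ToKi | scripts/map_generator.py | place_house
-- ===== SOURCE A (Python) =====
-- def place_house(grid, top_left, size=4):
--     H=len(grid); W=len(grid[0])
--     x0,y0 = top_left
--     x1 = x0+size-1
--     y1 = y0+size-1
--     if x1>=W or y1>=H:
--         return False
--     for y in range(y0,y1+1):
--         for x in range(x0,x1+1):
--             if grid[y][x] in ("water","sand","dirt"):
--                 return False
--     for x in range(x0,x1+1):
--         grid[y0][x] = "brick"
--         grid[y1][x] = "brick"
--     for y in range(y0,y1+1):
--         grid[y][x0] = "brick"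
--         grid[y][x1] = "brick"
--     for y in range(y0+1,y1):
--         for x in range(x0+1,x1):
--             grid[y][x] = "roof"
--     return True
-- ===== SOURCE B (Python) =====
-- BLOCKED = {"water", "sand", "dirt"}
--
-- def place_house(grid, top_left, size=4):
--     # Stamp-and-blit: precompute the whole house pattern as a matrix, check the
--     # region by set intersection, then blit the stamp over the region.
--     H, W = len(grid), len(grid[0])
--     x0, y0 = top_left
--     if x0 + size > W or y0 + size > H:
--         return False
--     region = [grid[y][x] for y in range(y0, y0 + size) for x in range(x0, x0 + size)]
--     if BLOCKED & set(region):
--         return False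
--     if size > 0:
--         edge = ["brick"] * size
--         mid = ["brick"] + ["roof"] * (size - 2) + ["brick"] if size >= 2 else edge
--         stamp = [edge] + [mid] * (size - 2) + [edge] if size >= 2 else [edge]
--         for dy, row in enumerate(stamp):
--             for dx, tile in enumerate(row):
--                 grid[y0 + dy][x0 + dx] = tile
--     return True
-- ===== Notes on version B (the rewrite author's own statement) =====
-- stated objective: alternative
-- what changed: B replaces A's early-exit scan plus four geometric edge-drawing loops by materialising the region as a list checked via set intersection with a blocked-tile set, then precomputing the whole house as a stamp matrix (edge row, middle rows) and blitting it over the region.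
import Mathlib
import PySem

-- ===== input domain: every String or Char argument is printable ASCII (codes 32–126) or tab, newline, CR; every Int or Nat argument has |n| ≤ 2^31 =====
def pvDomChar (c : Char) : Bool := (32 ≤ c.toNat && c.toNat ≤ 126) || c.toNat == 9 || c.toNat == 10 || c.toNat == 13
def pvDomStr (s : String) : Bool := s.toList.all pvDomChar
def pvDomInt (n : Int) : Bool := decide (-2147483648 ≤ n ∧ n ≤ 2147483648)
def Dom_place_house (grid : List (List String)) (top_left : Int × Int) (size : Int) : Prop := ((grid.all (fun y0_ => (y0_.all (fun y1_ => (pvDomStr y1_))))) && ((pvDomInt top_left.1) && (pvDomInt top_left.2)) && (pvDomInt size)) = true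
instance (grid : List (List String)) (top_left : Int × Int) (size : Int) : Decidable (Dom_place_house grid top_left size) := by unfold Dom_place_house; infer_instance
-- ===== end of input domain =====

-- B replaces A's edge-drawing algorithm by stamp-and-blit: it materialises the region, tests it by
-- set intersection against the blocked set, precomputes the whole house pattern as a matrix and
-- blits it; both mutate the grid in place in Python (same final grid) — the equivalence proved
-- here is about the RETURN value.


-- ===== PORT A =====
-- grid[y][x] in ("water","sand","dirt")
def pvBadTile (s : String) : Bool := s == "water" || s == "sand" || s == "dirt"

-- grid[y][x] = v  (Python index semantics incl. negative wrap; in-range under Pre_)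
def pvSetCell (g : List (List String)) (y x : Int) (v : String) : List (List String) :=
  PySem.List.pySetD g y (PySem.List.pySetD ((PySem.List.pyGet? g y).getD []) x v)

-- grid[y][x] read (in-range under Pre_)
def pvGetCell (g : List (List String)) (y x : Int) : String :=
  (PySem.List.pyGet? ((PySem.List.pyGet? g y).getD []) x).getD ""

def place_house (grid : List (List String)) (top_left : Int × Int) (size : Int) : Bool :=
  match PySem.List.pyGet? grid 0 with
  | none => false   -- Python raises IndexError on len(grid[0]) here; excluded by Pre_
  | some row0 =>
    let H : Int := grid.length
    let W : Int := row0.length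
    let x0 := top_left.1
    let y0 := top_left.2
    let x1 := x0 + size - 1
    let y1 := y0 + size - 1
    if x1 ≥ W ∨ y1 ≥ H then false
    else if (PySem.List.pyRange y0 (y1+1) 1).any (fun y =>
              (PySem.List.pyRange x0 (x1+1) 1).any (fun x => pvBadTile (pvGetCell grid y x)))
    then false
    else
      -- Python mutates grid in place; the writes are transliterated and their result discarded,
      -- since only the return value is modelled here.
      let g1 := (PySem.List.pyRange x0 (x1+1) 1).foldl (fun g x =>
                  pvSetCell (pvSetCell g y0 x "brick") y1 x "brick") grid
      let g2 := (PySem.List.pyRange y0 (y1+1) 1).foldl (fun g y =>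
                  pvSetCell (pvSetCell g y x0 "brick") y x1 "brick") g1
      let _g3 := (PySem.List.pyRange (y0+1) y1 1).foldl (fun g y =>
                  (PySem.List.pyRange (x0+1) x1 1).foldl (fun g x => pvSetCell g y x "roof") g) g2
      true

-- ===== PORT B =====
-- BLOCKED = {"water","sand","dirt"}
def pvBlocked : PySem.Set String := PySem.Set.ofList ["water", "sand", "dirt"]

def place_house_alt (grid : List (List String)) (top_left : Int × Int) (size : Int) : Bool :=
  match PySem.List.pyGet? grid 0 with
  | none => false   -- Python raises IndexError on len(grid[0]) here; excluded by Pre_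
  | some row0 =>
    let H : Int := grid.length
    let W : Int := row0.length
    let x0 := top_left.1
    let y0 := top_left.2
    if x0 + size > W ∨ y0 + size > H then false
    else
      let region := (PySem.List.pyRange y0 (y0 + size) 1).flatMap (fun y =>
                      (PySem.List.pyRange x0 (x0 + size) 1).map (fun x => pvGetCell grid y x))
      if PySem.Set.inter pvBlocked (PySem.Set.ofList region) ≠ [] then false
      else
        -- stamp build + blit (in-place in Python; discarded here, only the return value is modelled)
        let _g :=
          if size > 0 then
            let edge := List.replicate size.toNat "brick"
            let mid := if size ≥ 2 then "brick" :: (List.replicate (size - 2).toNat "roof" ++ ["brick"]) else edge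
            let stamp := if size ≥ 2 then [edge] ++ List.replicate (size - 2).toNat mid ++ [edge] else [edge]
            (PySem.List.enumerate stamp 0).foldl (fun g (p : Int × List String) =>
              (PySem.List.enumerate p.2 0).foldl (fun g (q : Int × String) =>
                pvSetCell g (y0 + p.1) (x0 + q.1) q.2) g) grid
          else grid
        true

-- ===== PRECONDITION & SPEC =====
-- Pre_ excludes exactly where A raises IndexError: the empty grid (len(grid[0])), and any region
-- (when the bounds check passes) containing an invalid cell index — the region is scanned in
-- ascending order, so the invalid (most negative) index is always hit before any tile is read.
def Pre_place_house (grid : List (List String)) (top_left : Int × Int) (size : Int) : Prop :=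
  grid ≠ [] ∧
  (top_left.1 + size - 1 ≥ ((grid.headD []).length : Int) ∨
   top_left.2 + size - 1 ≥ (grid.length : Int) ∨
   ∀ y ∈ PySem.List.pyRange top_left.2 (top_left.2 + size) 1,
     (PySem.List.pyGet? grid y).isSome = true ∧
     ∀ x ∈ PySem.List.pyRange top_left.1 (top_left.1 + size) 1,
       (PySem.List.pyGet? ((PySem.List.pyGet? grid y).getD []) x).isSome = true)
instance (grid : List (List String)) (top_left : Int × Int) (size : Int) : Decidable (Pre_place_house grid top_left size) := by unfold Pre_place_house; infer_instance

def pvWitness_place_house : List (List String) × (Int × Int) × Int :=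
  ([["grass", "grass"], ["grass", "grass"]], ((0, 0), 2))

def Spec_place_house (grid : List (List String)) (top_left : Int × Int) (size : Int) (out : Bool) : Prop := out = place_house_alt grid top_left size
instance (grid : List (List String)) (top_left : Int × Int) (size : Int) (out : Bool) : Decidable (Spec_place_house grid top_left size out) := by unfold Spec_place_house; infer_instance

-- ===== CLAIM (what is proved, stated in full; the proofs are below) =====
def Claim_equal_place_house : Prop := ∀ (grid : List (List String)) (top_left : Int × Int) (size : Int), Dom_place_house grid top_left size → Pre_place_house grid top_left size → Spec_place_house grid top_left size (place_house grid top_left size)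

-- ===== LEMMAS AND PROOFS =====
-- A's early-exit scan of the region and B's set intersection of the materialised region with the
-- blocked set answer the same existence question: is some region cell a blocked tile?
theorem pv_scan_eq (grid : List (List String)) (x0 y0 b c : Int) :
    ((PySem.List.pyRange y0 b 1).any (fun y =>
        (PySem.List.pyRange x0 c 1).any (fun x => pvBadTile (pvGetCell grid y x))) = true)
    ↔ PySem.Set.inter pvBlocked
        (PySem.Set.ofList ((PySem.List.pyRange y0 b 1).flatMap (fun y =>
          (PySem.List.pyRange x0 c 1).map (fun x => pvGetCell grid y x)))) ≠ [] := by
  rw [Ne, List.eq_nil_iff_forall_not_mem]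
  push Not
  simp only [List.any_eq_true, PySem.Set.mem_inter, pvBlocked, PySem.Set.mem_ofList,
    List.mem_flatMap, List.mem_map, List.mem_cons, List.not_mem_nil, or_false]
  constructor
  · rintro ⟨y, hy, x, hx, hbad⟩
    refine ⟨pvGetCell grid y x, ?_, y, hy, x, hx, rfl⟩
    simp only [pvBadTile, Bool.or_eq_true, beq_iff_eq] at hbad
    tauto
  · rintro ⟨t, ht, y, hy, x, hx, rfl⟩
    refine ⟨y, hy, x, hx, ?_⟩
    simp only [pvBadTile, Bool.or_eq_true, beq_iff_eq]
    tauto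

-- ===== VERDICT (by name: the statement is the Claim_ definition above) =====
theorem place_house_spec : Claim_equal_place_house := by
  intro grid top_left size _hDom _hPre
  unfold Spec_place_house place_house place_house_alt
  cases PySem.List.pyGet? grid 0 with
  | none => rfl
  | some row0 =>
    simp only []
    have e1 : top_left.2 + size - 1 + 1 = top_left.2 + size := by ring
    have e2 : top_left.1 + size - 1 + 1 = top_left.1 + size := by ring
    rw [e1, e2]
    have hc : (top_left.1 + size - 1 ≥ (row0.length : Int) ∨ top_left.2 + size - 1 ≥ (grid.length : Int))
        ↔ (top_left.1 + size > (row0.length : Int) ∨ top_left.2 + size > (grid.length : Int)) := by omega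
    have hs := pv_scan_eq grid top_left.1 top_left.2 (top_left.2 + size) (top_left.1 + size)
    have hs' : ((PySem.List.pyRange top_left.2 (top_left.2 + size) 1).any (fun y =>
        (PySem.List.pyRange top_left.1 (top_left.1 + size) 1).any
          (fun x => pvBadTile (pvGetCell grid y x))))
        = decide (PySem.Set.inter pvBlocked
            (PySem.Set.ofList ((PySem.List.pyRange top_left.2 (top_left.2 + size) 1).flatMap (fun y =>
              (PySem.List.pyRange top_left.1 (top_left.1 + size) 1).map
                (fun x => pvGetCell grid y x)))) ≠ []) :=
      Bool.eq_iff_iff.mpr (by rw [decide_eq_true_eq]; exact hs)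
    simp only [hc, hs', decide_eq_true_eq]
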